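-- pv_equiv track=rewrite | github.com/colinbrownec/AdventOfCode | 2024/day9/day9.py | free_p1
-- ===== SOURCE A (Python) =====
-- FREE_MEMORY = -1
--
-- def diskmap_files(diskmap):
--     index = 0
--     num = 0
--     file = True
--     files = []
--     for val in diskmap:
--         if file:
--             files.append({ 'value': num, 'index': index, 'size': val})
--             num += 1
--         file = not file
--         index += val
--     return files
--
-- def memory_layout(files, n):
--     memory = [FREE_MEMORY] * n
--     for file in files:
--         for i in range(file['size']):
--             memory[file['index'] + i] = file['value']
--     return memory
--
-- def free_p1(diskmap):
--     files = diskmap_files(diskmap)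
--     memory = memory_layout(files, sum(diskmap))
--
--     begin = 0
--     end = len(memory) - 1
--
--     while begin < end:
--         if memory[end] == FREE_MEMORY:
--             end -= 1
--             continue
--
--         if memory[begin] != FREE_MEMORY:
--             begin += 1
--             continue
--
--         memory[begin] = memory[end]
--         memory[end] = FREE_MEMORY
--         begin += 1
--         end -= 1
--
--     return memory
-- ===== SOURCE B (Python) =====
-- FREE_MEMORY = -1
--
-- def free_p1(diskmap):
--     # Expand the diskmap into blocks (file ids at even segments, FREE_MEMORY at odd).
--     blocks = []
--     fid = 0
--     for i, size in enumerate(diskmap):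
--         if i % 2 == 0:
--             blocks.extend([fid] * size)
--             fid += 1
--         else:
--             blocks.extend([FREE_MEMORY] * size)
--     # Total number of file blocks = sum of even-indexed sizes.
--     file_total = sum(size for i, size in enumerate(diskmap) if i % 2 == 0)
--     # File blocks past the compaction boundary, consumed back-to-front.
--     tail = [b for b in blocks[file_total:] if b != FREE_MEMORY]
--     out = []
--     for b in blocks[:file_total]:
--         if b == FREE_MEMORY:
--             out.append(tail.pop())
--         else:
--             out.append(b)
--     out.extend([FREE_MEMORY] * (len(blocks) - file_total))
--     return out
-- ===== Notes on version B (the rewrite author's own statement) =====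
-- stated objective: alternative
-- what changed: Instead of materialising files as dicts, writing them into a mutable memory array and compacting it with an in-place two-pointer swap loop, B expands the diskmap into blocks in one pass, computes the number F of file blocks, collects the file blocks lying past position F, and emits the compacted prefix in a single forward pass popping those tail blocks into the free slots, then pads with FREE_MEMORY.
-- outside the precondition, e.g. on free_p1([-2]): A returns [], B returns [-1, -1]
import Mathlib
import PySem

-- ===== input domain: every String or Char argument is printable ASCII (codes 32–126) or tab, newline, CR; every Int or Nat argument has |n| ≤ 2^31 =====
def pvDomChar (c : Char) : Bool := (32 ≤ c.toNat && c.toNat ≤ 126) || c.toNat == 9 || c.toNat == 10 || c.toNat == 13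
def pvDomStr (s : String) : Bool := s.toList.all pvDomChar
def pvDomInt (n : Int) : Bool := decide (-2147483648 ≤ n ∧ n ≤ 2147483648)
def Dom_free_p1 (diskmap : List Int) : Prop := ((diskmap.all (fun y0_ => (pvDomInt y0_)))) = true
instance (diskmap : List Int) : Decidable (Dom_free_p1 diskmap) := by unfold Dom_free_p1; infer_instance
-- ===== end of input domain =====

-- B replaces A's mutable memory array + in-place two-pointer compaction by a single
-- forward pass over the expanded blocks that pops tail file blocks into the free slots
-- (objective: alternative decomposition, same asymptotic cost).

-- ===== PORT A =====
-- the dict { 'value': …, 'index': …, 'size': … } as a record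
structure AFile where
  value : Int
  index : Int
  size : Int
deriving DecidableEq, Repr

def diskmapFiles (diskmap : List Int) : List AFile :=
  (diskmap.foldl
    (fun (st : Int × Int × Bool × List AFile) val =>
      let (num, files) :=
        if st.2.2.1 then (st.2.1 + 1, st.2.2.2 ++ [⟨st.2.1, st.1, val⟩]) else (st.2.1, st.2.2.2)
      (st.1 + val, num, !st.2.2.1, files))
    (0, 0, true, [])).2.2.2

def memoryLayout (files : List AFile) (n : Int) : List Int :=
  files.foldl
    (fun memory f =>
      (PySem.List.pyRange 0 f.size 1).foldl
        (fun memory i => PySem.List.pySetD memory (f.index + i) f.value) memory)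
    (PySem.List.pyRepeat [(-1 : Int)] n)

-- the while loop of free_p1 (begin/end two pointers); pyGetD/pySetD are in range on Pre_
def loopA (memory : List Int) (b e : Int) : List Int :=
  if h : b < e then
    if PySem.List.pyGetD memory e 0 = -1 then
      loopA memory b (e - 1)
    else if PySem.List.pyGetD memory b 0 ≠ -1 then
      loopA memory (b + 1) e
    else
      loopA
        (PySem.List.pySetD (PySem.List.pySetD memory b (PySem.List.pyGetD memory e 0)) e (-1))
        (b + 1) (e - 1)
  else memory
termination_by (e - b).toNat
decreasing_by all_goals omega

def free_p1 (diskmap : List Int) : List Int :=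
  let files := diskmapFiles diskmap
  let memory := memoryLayout files diskmap.sum
  loopA memory 0 (PySem.List.len memory - 1)

-- ===== PORT B =====
def buildBlocks (diskmap : List Int) : List Int :=
  ((PySem.List.enumerate diskmap 0).foldl
    (fun (st : Int × List Int) p =>
      if PySem.Int.mod p.1 2 = 0 then
        (st.1 + 1, st.2 ++ PySem.List.pyRepeat [st.1] p.2)
      else
        (st.1, st.2 ++ PySem.List.pyRepeat [(-1 : Int)] p.2))
    (0, [])).2

def fileTotalB (diskmap : List Int) : Int :=
  (((PySem.List.enumerate diskmap 0).filter
      (fun p => PySem.Int.mod p.1 2 == 0)).map (·.2)).sum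

def free_p1_alt (diskmap : List Int) : List Int :=
  let blocks := buildBlocks diskmap
  let fileTotal := fileTotalB diskmap
  let tail := (PySem.List.slice blocks (some fileTotal) none).filter (· != -1)
  let outTail :=
    (PySem.List.slice blocks none (some fileTotal)).foldl
      (fun (st : List Int × List Int) b =>
        if b = -1 then (st.1 ++ [st.2.getLast?.getD 0], st.2.dropLast)  -- tail.pop(): nonempty on Pre_
        else (st.1 ++ [b], st.2))
      ([], tail)
  outTail.1 ++ PySem.List.pyRepeat [(-1 : Int)] (PySem.List.len blocks - fileTotal)

-- ===== PRECONDITION & SPEC =====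
-- Pre_ restricts to the natural domain of a diskmap: nonnegative segment lengths.  A negative
-- entry is malformed input, on which A either raises IndexError or returns an accidental value
-- produced by Python's negative-index wraparound writes; B does not reproduce those values.
def Pre_free_p1 (diskmap : List Int) : Prop := ∀ x ∈ diskmap, 0 ≤ x
instance (diskmap : List Int) : Decidable (Pre_free_p1 diskmap) := by
  unfold Pre_free_p1; infer_instance

def pvWitness_free_p1 : List Int := [2, 3, 1, 4, 2]

def Spec_free_p1 (diskmap : List Int) (out : List Int) : Prop := out = free_p1_alt diskmap
instance (diskmap : List Int) (out : List Int) : Decidable (Spec_free_p1 diskmap out) := by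
  unfold Spec_free_p1; infer_instance

-- ===== CLAIM (what is proved, stated in full; the proofs are below) =====
def Claim_equal_free_p1 : Prop :=
  ∀ (diskmap : List Int), Dom_free_p1 diskmap → Pre_free_p1 diskmap →
    Spec_free_p1 diskmap (free_p1 diskmap)

-- ===== LEMMAS AND PROOFS =====

-- structural expansion of the diskmap into blocks
def expand : List Int → Int → Bool → List Int
  | [], _, _ => []
  | v :: rest, fid, isFile =>
    (if isFile then List.replicate v.toNat fid else List.replicate v.toNat (-1))
      ++ expand rest (if isFile then fid + 1 else fid) (!isFile)

-- structural form of A's files list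
def filesOf : List Int → Int → Int → Bool → List AFile
  | [], _, _, _ => []
  | v :: rest, idx, num, true => ⟨num, idx, v⟩ :: filesOf rest (idx + v) (num + 1) false
  | v :: rest, idx, num, false => filesOf rest (idx + v) num true

-- structural form of the even-position size sum
def evenSum : List Int → Bool → Int
  | [], _ => 0
  | v :: rest, true => v + evenSum rest false
  | _ :: rest, false => evenSum rest true

-- recursion computed by B's output fold: fill the -1 slots from the end of the tail
def fillF : List Int → List Int → List Int
  | [], _ => []
  | x :: xs, t =>
    if x = -1 then (t.getLast?.getD 0) :: fillF xs t.dropLast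
    else x :: fillF xs t

-- the common functional specification of the compacted memory
def specMem (mem : List Int) : List Int :=
  fillF (mem.take (mem.countP (· != -1)))
      ((mem.drop (mem.countP (· != -1))).filter (· != -1))
    ++ List.replicate (mem.length - mem.countP (· != -1)) (-1)

def natSum (xs : List Int) : Nat := (xs.map Int.toNat).sum

theorem natSum_cons (v : Int) (xs : List Int) : natSum (v :: xs) = v.toNat + natSum xs := by
  simp [natSum]

theorem sum_toNat (xs : List Int) (h : ∀ x ∈ xs, 0 ≤ x) : xs.sum.toNat = natSum xs := by
  induction xs with
  | nil => simp [natSum]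
  | cons v rest ih =>
    have hv : 0 ≤ v := h v (by simp)
    have hs : 0 ≤ rest.sum := List.sum_nonneg (fun x hx => h x (by simp [hx]))
    have hr := ih (fun x hx => h x (by simp [hx]))
    rw [natSum_cons, List.sum_cons]
    omega

theorem filesOf_foldl (xs : List Int) : ∀ (idx num : Int) (file : Bool) (acc : List AFile),
    (xs.foldl
      (fun (st : Int × Int × Bool × List AFile) val =>
        let (num, files) :=
          if st.2.2.1 then (st.2.1 + 1, st.2.2.2 ++ [⟨st.2.1, st.1, val⟩]) else (st.2.1, st.2.2.2)
        (st.1 + val, num, !st.2.2.1, files))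
      (idx, num, file, acc)).2.2.2
    = acc ++ filesOf xs idx num file := by
  induction xs with
  | nil => intro idx num file acc; simp [filesOf]
  | cons v rest ih =>
    intro idx num file acc
    cases file <;> simp [List.foldl_cons, filesOf, ih]

theorem set_append_len (P Q' : List Int) (q val : Int) :
    (P ++ q :: Q').set P.length val = P ++ val :: Q' := by
  induction P with
  | nil => simp
  | cons x P ih => simp [ih]

theorem writeSeg (val : Int) : ∀ (n : Nat) (a k : Int) (P Q : List Int),
    k + a = (P.length : Int) → n ≤ Q.length →
    (PySem.List.pyRange a (a + (n : Int)) 1).foldl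
      (fun m i => PySem.List.pySetD m (k + i) val) (P ++ Q)
      = P ++ List.replicate n val ++ Q.drop n := by
  intro n
  induction n with
  | zero =>
    intro a k P Q hk hn
    rw [PySem.List.pyRange_one_eq_nil (by push_cast; omega)]
    simp
  | succ m ih =>
    intro a k P Q hk hn
    obtain ⟨q, Q', rfl⟩ : ∃ q Q', Q = q :: Q' := by
      cases Q with
      | nil => simp at hn
      | cons q Q' => exact ⟨q, Q', rfl⟩
    rw [PySem.List.pyRange_one_cons (by push_cast; omega)]
    simp only [List.foldl_cons]
    have hset : PySem.List.pySetD (P ++ q :: Q') (k + a) val = (P ++ [val]) ++ Q' := by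
      rw [hk]
      rw [show ((P.length : Int)) = ((P.length : Nat) : Int) from rfl]
      rw [PySem.List.pySetD_natCast]
      rw [set_append_len]
      simp
    rw [hset]
    have hrange : a + ((m + 1 : Nat) : Int) = (a + 1) + (m : Int) := by push_cast; ring
    rw [hrange]
    rw [ih (a + 1) k (P ++ [val]) Q' (by simp; omega) (by simp at hn; omega)]
    simp [List.replicate_succ, List.append_assoc]

theorem memLayout (xs : List Int) : ∀ (idx num : Int) (isFile : Bool) (P : List Int),
    (∀ x ∈ xs, 0 ≤ x) → idx = (P.length : Int) →
    (filesOf xs idx num isFile).foldl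
      (fun memory f =>
        (PySem.List.pyRange 0 f.size 1).foldl
          (fun memory i => PySem.List.pySetD memory (f.index + i) f.value) memory)
      (P ++ List.replicate (natSum xs) (-1))
      = P ++ expand xs num isFile := by
  induction xs with
  | nil => intro idx num isFile P h hidx; simp [filesOf, expand, natSum]
  | cons v rest ih =>
    intro idx num isFile P h hidx
    have hv : 0 ≤ v := h v (by simp)
    have hrest : ∀ x ∈ rest, 0 ≤ x := fun x hx => h x (by simp [hx])
    rw [natSum_cons, List.replicate_add]
    cases isFile with
    | true =>
      simp only [filesOf, List.foldl_cons]
      have hw := writeSeg num v.toNat 0 idx P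
        (List.replicate v.toNat (-1) ++ List.replicate (natSum rest) (-1))
        (by omega) (by simp)
      rw [show (0 : Int) + ((v.toNat : Nat) : Int) = v from by omega] at hw
      rw [hw]
      rw [List.drop_append_of_le_length (by simp)]
      simp only [List.drop_replicate, Nat.sub_self, List.replicate_zero, List.nil_append]
      rw [ih (idx + v) (num + 1) false (P ++ List.replicate v.toNat num) hrest
        (by simp; omega)]
      simp [expand, List.append_assoc]
    | false =>
      simp only [filesOf]
      rw [← List.append_assoc]
      rw [ih (idx + v) num true (P ++ List.replicate v.toNat (-1)) hrest
        (by simp; omega)]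
      simp [expand, List.append_assoc]

theorem free_p1_eq_loop (d : List Int) (h : ∀ x ∈ d, 0 ≤ x) :
    free_p1 d = loopA (expand d 0 true) 0 (((expand d 0 true).length : Int) - 1) := by
  have h1 : diskmapFiles d = filesOf d 0 0 true := by
    unfold diskmapFiles
    rw [filesOf_foldl]
    simp
  have h2 : memoryLayout (filesOf d 0 0 true) d.sum = expand d 0 true := by
    unfold memoryLayout
    rw [PySem.List.pyRepeat_singleton, sum_toNat d h]
    have := memLayout d 0 0 true [] h (by simp)
    simpa using this
  simp only [free_p1, h1, h2, PySem.List.len_eq]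

theorem fillF_no_free : ∀ (xs t : List Int), (∀ x ∈ xs, x ≠ -1) → fillF xs t = xs := by
  intro xs
  induction xs with
  | nil => intro t _; simp [fillF]
  | cons x xs ih =>
    intro t hp
    have hx : x ≠ -1 := hp x (by simp)
    simp [fillF, hx, ih t (fun y hy => hp y (by simp [hy]))]

theorem fillF_push : ∀ (pre rest t : List Int) (v : Int),
    (∀ x ∈ pre, x ≠ -1) → v ≠ -1 →
    fillF (pre ++ (-1) :: rest) (t ++ [v]) = fillF (pre ++ v :: rest) t := by
  intro pre
  induction pre with
  | nil =>
    intro rest t v _ hv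
    simp [fillF, hv]
  | cons x pre ih =>
    intro rest t v hp hv
    have hx : x ≠ -1 := hp x (by simp)
    simp only [List.cons_append, fillF, if_neg hx]
    rw [ih rest t v (fun y hy => hp y (by simp [hy])) hv]

theorem countP_le_of_free (mem : List Int) (j : Nat) (_ : j < mem.length)
    (hfree : ∀ i (h : i < mem.length), j ≤ i → mem[i] = -1) :
    mem.countP (· != -1) ≤ j := by
  conv_lhs => rw [← List.take_append_drop j mem]
  rw [List.countP_append]
  have h1 : (mem.take j).countP (· != -1) ≤ j :=
    le_trans List.countP_le_length (by rw [List.length_take]; omega)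
  have h2 : (mem.drop j).countP (· != -1) = 0 := by
    rw [List.countP_eq_zero]
    intro a ha
    obtain ⟨k, hk, rfl⟩ := List.mem_iff_getElem.mp ha
    have hk' : j + k < mem.length := by simp at hk; omega
    have := hfree (j + k) hk' (by omega)
    simp [List.getElem_drop, this]
  omega

theorem countP_take_eq (mem : List Int) (b : Nat) (hb : b ≤ mem.length)
    (hpre : ∀ i (h : i < mem.length), i < b → mem[i] ≠ -1) :
    (mem.take b).countP (· != -1) = b := by
  rw [List.countP_eq_length.mpr, List.length_take]
  · omega
  · intro a ha
    obtain ⟨k, hk, rfl⟩ := List.mem_iff_getElem.mp ha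
    have hk' : k < mem.length := by simp at hk; omega
    rw [List.getElem_take]
    have := hpre k hk' (by simp at hk; omega)
    simpa using this

theorem lt_countP_of_nonfree (mem : List Int) (j : Nat) (hj : j < mem.length)
    (hpre : ∀ i (h : i < mem.length), i ≤ j → mem[i] ≠ -1) :
    j < mem.countP (· != -1) := by
  conv_rhs => rw [← List.take_append_drop (j + 1) mem]
  rw [List.countP_append]
  have h1 : (mem.take (j + 1)).countP (· != -1) = j + 1 :=
    countP_take_eq mem (j + 1) (by omega) (fun i h hi => hpre i h (by omega))
  omega

theorem specMem_of_sorted (mem : List Int)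
    (hs : ∀ (j : Nat) (hj : j < mem.length), mem[j] ≠ -1 →
      ∀ (i : Nat) (hi : i ≤ j), mem[i]'(by omega) ≠ -1) :
    specMem mem = mem := by
  have hFlen : mem.countP (· != -1) ≤ mem.length := List.countP_le_length
  have htake : ∀ x ∈ mem.take (mem.countP (· != -1)), x ≠ -1 := by
    intro a ha
    obtain ⟨k, hk, rfl⟩ := List.mem_iff_getElem.mp ha
    have hk1 : k < mem.countP (· != -1) := by simp at hk; omega
    have hk2 : k < mem.length := by omega
    rw [List.getElem_take]
    by_contra hc
    have hfree : ∀ i (h : i < mem.length), k ≤ i → mem[i] = -1 := by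
      intro i h hki
      by_contra hne
      exact (hs i h hne k hki) hc
    have := countP_le_of_free mem k hk2 hfree
    omega
  have hdrop : ∀ x ∈ mem.drop (mem.countP (· != -1)), x = -1 := by
    intro a ha
    obtain ⟨k, hk, rfl⟩ := List.mem_iff_getElem.mp ha
    have hk2 : mem.countP (· != -1) + k < mem.length := by simp at hk; omega
    rw [List.getElem_drop]
    by_contra hne
    have := lt_countP_of_nonfree mem (mem.countP (· != -1) + k) hk2
      (fun i h hi => hs (mem.countP (· != -1) + k) hk2 hne i hi)
    omega
  unfold specMem
  rw [fillF_no_free _ _ htake]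
  have hd : mem.drop (mem.countP (· != -1))
      = List.replicate (mem.length - mem.countP (· != -1)) (-1) := by
    rw [List.eq_replicate_iff]
    exact ⟨by simp, hdrop⟩
  rw [← hd, List.take_append_drop]

theorem countP_set_aux (l : List Int) (n : Nat) (a : Int) (h : n < l.length) :
    (l.set n a).countP (· != -1) + (if l[n] != -1 then 1 else 0)
      = l.countP (· != -1) + (if a != -1 then 1 else 0) := by
  have hl : l.countP (· != -1)
      = (l.take n).countP (· != -1) + (l.drop (n + 1)).countP (· != -1)
        + (if l[n] != -1 then 1 else 0) := by
    conv_lhs => rw [← List.take_append_drop n l, ← List.getElem_cons_drop h]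
    rw [List.countP_append, List.countP_cons]
    split_ifs <;> omega
  have hset : (l.set n a).countP (· != -1)
      = (l.take n).countP (· != -1) + (l.drop (n + 1)).countP (· != -1)
        + (if a != -1 then 1 else 0) := by
    rw [List.set_eq_take_cons_drop a h]
    rw [List.countP_append, List.countP_cons]
    split_ifs <;> omega
  omega

theorem drop_set_ge (l : List Int) (n m : Nat) (a : Int) (hnm : n ≤ m) (_hm : m < l.length) :
    (l.set m a).drop n = (l.drop n).set (m - n) a := by
  apply List.ext_getElem (by simp)
  intro i h1 h2
  simp only [List.getElem_drop, List.getElem_set]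
  by_cases hcase : m = n + i
  · rw [if_pos hcase, if_pos (by omega)]
  · rw [if_neg hcase, if_neg (by omega)]

theorem specMem_swap (mem : List Int) (b e : Nat) (hbe : b < e) (he : e < mem.length)
    (hbv : mem[b]'(by omega) = -1) (hev : mem[e] ≠ -1)
    (hpre : ∀ i (h : i < mem.length), i < b → mem[i] ≠ -1)
    (hsuf : ∀ i (h : i < mem.length), e < i → mem[i] = -1) :
    specMem ((mem.set b (mem[e])).set e (-1)) = specMem mem := by
  have hb : b < mem.length := by omega
  have hevb : (mem[e] != -1) = true := by
    simp only [bne_iff_ne, ne_eq]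
    exact hev
  -- b < F
  have hF1 : b < mem.countP (· != -1) := by
    conv_rhs => rw [← List.take_append_drop b mem]
    rw [List.countP_append]
    have h1 : (mem.take b).countP (· != -1) = b := countP_take_eq mem b (by omega) hpre
    have h2 : 0 < (mem.drop b).countP (· != -1) := by
      rw [List.countP_pos_iff]
      have hidx : e - b < (mem.drop b).length := by simp; omega
      have heq : (mem.drop b)[e - b]'hidx = mem[e] := by
        rw [List.getElem_drop]
        congr 1
        omega
      exact ⟨mem[e], heq ▸ List.getElem_mem hidx, hevb⟩
    omega
  -- F ≤ e
  have hF2 : mem.countP (· != -1) ≤ e := by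
    conv_lhs => rw [← List.take_append_drop (e + 1) mem]
    rw [List.countP_append]
    have h2 : (mem.drop (e + 1)).countP (· != -1) = 0 := by
      rw [List.countP_eq_zero]
      intro a ha
      obtain ⟨k, hk, rfl⟩ := List.mem_iff_getElem.mp ha
      have hk' : e + 1 + k < mem.length := by simp at hk; omega
      have := hsuf (e + 1 + k) hk' (by omega)
      simp [List.getElem_drop, this]
    have h1 : (mem.take (e + 1)).countP (· != -1) < e + 1 := by
      by_contra hc
      have hle : (mem.take (e + 1)).countP (· != -1) ≤ (mem.take (e + 1)).length :=
        List.countP_le_length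
      have hlen2 : (mem.take (e + 1)).length = e + 1 := by rw [List.length_take]; omega
      have hall := List.countP_eq_length.mp
        (show (mem.take (e + 1)).countP (· != -1) = (mem.take (e + 1)).length by omega)
      have hidx : b < (mem.take (e + 1)).length := by omega
      have hmem : mem[b]'hb ∈ mem.take (e + 1) := by
        have hgt : (mem.take (e + 1))[b]'hidx = mem[b]'hb := List.getElem_take
        exact hgt ▸ List.getElem_mem hidx
      have := hall _ hmem
      rw [hbv] at this
      simp at this
    omega
  have hFlen : mem.countP (· != -1) ≤ mem.length := List.countP_le_length
  -- the count of file blocks is preserved by the swap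
  have hc1 : (mem.set b (mem[e])).countP (· != -1) = mem.countP (· != -1) + 1 := by
    have := countP_set_aux mem b (mem[e]) hb
    rw [hbv] at this
    rw [if_pos hevb] at this
    simp only [bne_self_eq_false, Bool.false_eq_true, if_false] at this
    omega
  have hgetset : (mem.set b (mem[e]))[e]'(by simp; omega) = mem[e] := by
    rw [List.getElem_set]
    rw [if_neg (by omega)]
  have hcount' : ((mem.set b (mem[e])).set e (-1)).countP (· != -1) = mem.countP (· != -1) := by
    have := countP_set_aux (mem.set b (mem[e])) e (-1) (by simp; omega)
    rw [hgetset] at this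
    rw [if_pos hevb] at this
    simp only [bne_self_eq_false, Bool.false_eq_true, if_false] at this
    omega
  -- take side
  have htake' : ((mem.set b (mem[e])).set e (-1)).take (mem.countP (· != -1))
      = (mem.take (mem.countP (· != -1))).set b (mem[e]) := by
    rw [List.take_set_of_le (by omega)]
    rw [List.take_set]
  -- drop side
  have hdrop' : ((mem.set b (mem[e])).set e (-1)).drop (mem.countP (· != -1))
      = (mem.drop (mem.countP (· != -1))).set (e - mem.countP (· != -1)) (-1) := by
    rw [drop_set_ge _ _ _ _ (by omega) (by simp; omega)]
    rw [List.drop_set_of_lt (by omega)]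
  -- tail decomposition
  have hjD : e - mem.countP (· != -1) < (mem.drop (mem.countP (· != -1))).length := by
    simp; omega
  have hDj : (mem.drop (mem.countP (· != -1)))[e - mem.countP (· != -1)]'hjD = mem[e] := by
    rw [List.getElem_drop]
    congr 1
    omega
  have htail0 : ∀ x ∈ (mem.drop (mem.countP (· != -1))).drop (e - mem.countP (· != -1) + 1),
      ¬ (x != -1) = true := by
    intro a ha
    obtain ⟨k, hk, rfl⟩ := List.mem_iff_getElem.mp ha
    simp only [List.getElem_drop]
    have hk' : mem.countP (· != -1) + (e - mem.countP (· != -1) + 1 + k) < mem.length := by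
      simp at hk; omega
    have := hsuf _ hk' (by omega)
    simp [this]
  have hfD : (mem.drop (mem.countP (· != -1))).filter (· != -1)
      = ((mem.drop (mem.countP (· != -1))).take (e - mem.countP (· != -1))).filter (· != -1)
        ++ [mem[e]] := by
    conv_lhs => rw [← List.take_append_drop (e - mem.countP (· != -1)) (mem.drop (mem.countP (· != -1))),
      ← List.getElem_cons_drop hjD]
    rw [List.filter_append, List.filter_cons]
    rw [hDj]
    rw [if_pos hevb]
    rw [List.filter_eq_nil_iff.mpr htail0]
  have hfD' : ((mem.drop (mem.countP (· != -1))).set (e - mem.countP (· != -1)) (-1)).filter (· != -1)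
      = ((mem.drop (mem.countP (· != -1))).take (e - mem.countP (· != -1))).filter (· != -1) := by
    rw [List.set_eq_take_cons_drop (-1) hjD]
    rw [List.filter_append, List.filter_cons]
    simp only [bne_self_eq_false, Bool.false_eq_true, if_false]
    rw [List.filter_eq_nil_iff.mpr htail0]
    simp
  -- prefix decomposition
  have hAb : b < (mem.take (mem.countP (· != -1))).length := by simp; omega
  have hAbv : (mem.take (mem.countP (· != -1)))[b]'hAb = mem[b]'hb := List.getElem_take
  have hA : mem.take (mem.countP (· != -1))
      = (mem.take (mem.countP (· != -1))).take b
        ++ (-1) :: (mem.take (mem.countP (· != -1))).drop (b + 1) := by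
    conv_lhs => rw [← List.take_append_drop b (mem.take (mem.countP (· != -1))),
      ← List.getElem_cons_drop hAb]
    rw [hAbv, hbv]
  have hA' : (mem.take (mem.countP (· != -1))).set b (mem[e])
      = (mem.take (mem.countP (· != -1))).take b
        ++ mem[e] :: (mem.take (mem.countP (· != -1))).drop (b + 1) :=
    List.set_eq_take_cons_drop _ hAb
  have hpreA : ∀ x ∈ (mem.take (mem.countP (· != -1))).take b, x ≠ -1 := by
    intro a ha
    obtain ⟨k, hk, rfl⟩ := List.mem_iff_getElem.mp ha
    have hk' : k < mem.length := by simp at hk; omega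
    have hkb : k < b := by simp at hk; omega
    have h1 : ((mem.take (mem.countP (· != -1))).take b)[k]
        = (mem.take (mem.countP (· != -1)))[k]'(by simp at hk ⊢; omega) :=
      List.getElem_take
    have h2 : (mem.take (mem.countP (· != -1)))[k]'(by simp at hk ⊢; omega) = mem[k]'hk' :=
      List.getElem_take
    rw [h1, h2]
    exact hpre k hk' hkb
  -- assemble
  unfold specMem
  rw [hcount']
  rw [htake', hdrop', hfD', hfD]
  rw [show ((mem.set b (mem[e])).set e (-1)).length = mem.length from by simp]
  congr 1
  rw [hA']
  conv_rhs => rw [hA]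
  exact (fillF_push _ _ _ _ hpreA hev).symm

-- the two-pointer while loop computes specMem, by induction on the pointer gap
theorem loopA_eq_specMem : ∀ (n : Nat) (mem : List Int) (b e : Int),
    (e - b).toNat ≤ n → 0 ≤ b → e < (mem.length : Int) →
    (∀ (i : Nat) (h : i < mem.length), ((i : Int) < b → mem[i] ≠ -1) ∧ (e < (i : Int) → mem[i] = -1)) →
    loopA mem b e = specMem mem := by
  intro n
  induction n with
  | zero =>
    intro mem b e hfuel h0 hlen hinv
    rw [loopA, dif_neg (by omega)]
    refine (specMem_of_sorted mem ?_).symm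
    intro j hj hjv i hi
    have hje : ¬ (e < (j : Int)) := fun hc => hjv ((hinv j hj).2 hc)
    by_cases hib : (i : Int) < b
    · exact (hinv i (by omega)).1 hib
    · have : i = j := by omega
      subst this
      exact hjv
  | succ m ih =>
    intro mem b e hfuel h0 hlen hinv
    by_cases hbe : b < e
    · have he0 : 0 ≤ e := by omega
      have helen : e.toNat < mem.length := by omega
      have hblen : b.toNat < mem.length := by omega
      have hgete : PySem.List.pyGetD mem e 0 = mem[e.toNat] :=
        PySem.List.pyGetD_eq_getElem mem 0 he0 hlen
      have hgetb : PySem.List.pyGetD mem b 0 = mem[b.toNat] :=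
        PySem.List.pyGetD_eq_getElem mem 0 h0 (by omega)
      rw [loopA, dif_pos hbe]
      by_cases h1 : PySem.List.pyGetD mem e 0 = -1
      · rw [if_pos h1]
        apply ih mem b (e - 1) (by omega) h0 (by omega)
        intro i hi
        refine ⟨(hinv i hi).1, fun hgt => ?_⟩
        by_cases hie : (i : Int) = e
        · have : i = e.toNat := by omega
          subst this
          rw [← hgete]
          exact h1
        · exact (hinv i hi).2 (by omega)
      · rw [if_neg h1]
        by_cases h2 : PySem.List.pyGetD mem b 0 ≠ -1
        · rw [if_pos h2]
          apply ih mem (b + 1) e (by omega) (by omega) hlen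
          intro i hi
          refine ⟨fun hlt => ?_, (hinv i hi).2⟩
          by_cases hib : (i : Int) = b
          · have : i = b.toNat := by omega
            subst this
            rw [← hgetb]
            exact h2
          · exact (hinv i hi).1 (by omega)
        · rw [if_neg h2]
          rw [not_not] at h2
          rw [hgete] at h1 ⊢
          rw [hgetb] at h2
          have hset : PySem.List.pySetD (PySem.List.pySetD mem b (mem[e.toNat])) e (-1)
              = (mem.set b.toNat (mem[e.toNat])).set e.toNat (-1) := by
            rw [PySem.List.pySetD_of_nonneg _ _ h0, PySem.List.pySetD_of_nonneg _ _ he0]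
          rw [hset]
          have hlen' : ((mem.set b.toNat (mem[e.toNat])).set e.toNat (-1)).length = mem.length := by
            simp
          rw [ih _ (b + 1) (e - 1) (by omega) (by omega) (by rw [hlen']; omega) ?_]
          · exact specMem_swap mem b.toNat e.toNat (by omega) helen h2 h1
              (fun i hi hib => (hinv i hi).1 (by omega))
              (fun i hi hie => (hinv i hi).2 (by omega))
          · intro i hi
            rw [hlen'] at hi
            constructor
            · intro hlt
              rw [List.getElem_set, List.getElem_set]
              by_cases hie : e.toNat = i
              · omega
              · rw [if_neg hie]
                by_cases hib : b.toNat = i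
                · rw [if_pos hib]
                  exact h1
                · rw [if_neg hib]
                  exact (hinv i hi).1 (by omega)
            · intro hgt
              rw [List.getElem_set, List.getElem_set]
              by_cases hie : e.toNat = i
              · rw [if_pos hie]
              · rw [if_neg hie]
                rw [if_neg (by omega)]
                exact (hinv i hi).2 (by omega)
    · rw [loopA, dif_neg hbe]
      refine (specMem_of_sorted mem ?_).symm
      intro j hj hjv i hi
      have hje : ¬ (e < (j : Int)) := fun hc => hjv ((hinv j hj).2 hc)
      by_cases hib : (i : Int) < b
      · exact (hinv i (by omega)).1 hib
      · have : i = j := by omega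
        subst this
        exact hjv

-- ===== B-side lemmas =====

theorem mod2_succ (s : Int) : (PySem.Int.mod (s + 1) 2 = 0) ↔ ¬ (PySem.Int.mod s 2 = 0) := by
  rw [PySem.Int.mod_eq_emod_of_pos (by norm_num), PySem.Int.mod_eq_emod_of_pos (by norm_num)]
  omega

theorem buildAux (xs : List Int) : ∀ (s fid : Int) (acc : List Int),
    ((PySem.List.enumerate xs s).foldl
      (fun (st : Int × List Int) p =>
        if PySem.Int.mod p.1 2 = 0 then
          (st.1 + 1, st.2 ++ PySem.List.pyRepeat [st.1] p.2)
        else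
          (st.1, st.2 ++ PySem.List.pyRepeat [(-1 : Int)] p.2))
      (fid, acc)).2
    = acc ++ expand xs fid (decide (PySem.Int.mod s 2 = 0)) := by
  induction xs with
  | nil => intro s fid acc; simp [PySem.List.enumerate_nil, expand]
  | cons v rest ih =>
    intro s fid acc
    rw [PySem.List.enumerate_cons]
    simp only [List.foldl_cons]
    by_cases h : PySem.Int.mod s 2 = 0
    · have hs0 : decide (PySem.Int.mod s 2 = 0) = true := decide_eq_true h
      have hs1 : decide (PySem.Int.mod (s + 1) 2 = 0) = false := by
        apply decide_eq_false
        rw [mod2_succ]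
        exact not_not_intro h
      rw [if_pos h, ih (s + 1) (fid + 1) (acc ++ PySem.List.pyRepeat [fid] v), hs1, hs0]
      rw [show expand (v :: rest) fid true
            = List.replicate v.toNat fid ++ expand rest (fid + 1) false from by simp [expand]]
      rw [PySem.List.pyRepeat_singleton, List.append_assoc]
    · have hs0 : decide (PySem.Int.mod s 2 = 0) = false := decide_eq_false h
      have hs1 : decide (PySem.Int.mod (s + 1) 2 = 0) = true := by
        apply decide_eq_true
        rw [mod2_succ]
        exact h
      rw [if_neg h, ih (s + 1) fid (acc ++ PySem.List.pyRepeat [(-1 : Int)] v), hs1, hs0]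
      rw [show expand (v :: rest) fid false
            = List.replicate v.toNat (-1) ++ expand rest fid true from by simp [expand]]
      rw [PySem.List.pyRepeat_singleton, List.append_assoc]

theorem evenSumAux (xs : List Int) : ∀ (s : Int),
    (((PySem.List.enumerate xs s).filter
        (fun p => PySem.Int.mod p.1 2 == 0)).map (·.2)).sum
      = evenSum xs (decide (PySem.Int.mod s 2 = 0)) := by
  induction xs with
  | nil => intro s; simp [PySem.List.enumerate_nil, evenSum]
  | cons v rest ih =>
    intro s
    rw [PySem.List.enumerate_cons]
    rw [List.filter_cons]
    by_cases h : PySem.Int.mod s 2 = 0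
    · have hs0 : decide (PySem.Int.mod s 2 = 0) = true := decide_eq_true h
      have hs1 : decide (PySem.Int.mod (s + 1) 2 = 0) = false := by
        apply decide_eq_false
        rw [mod2_succ]
        exact not_not_intro h
      rw [if_pos (by exact beq_iff_eq.mpr h)]
      simp only [List.map_cons, List.sum_cons]
      rw [ih (s + 1), hs1, hs0]
      rw [show evenSum (v :: rest) true = v + evenSum rest false from rfl]
    · have hs0 : decide (PySem.Int.mod s 2 = 0) = false := decide_eq_false h
      have hs1 : decide (PySem.Int.mod (s + 1) 2 = 0) = true := by
        apply decide_eq_true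
        rw [mod2_succ]
        exact h
      rw [if_neg (by simp only [beq_iff_eq]; exact h)]
      rw [ih (s + 1), hs1, hs0]
      rw [show evenSum (v :: rest) false = evenSum rest true from rfl]

theorem evenSum_nonneg (xs : List Int) : ∀ (bb : Bool), (∀ x ∈ xs, 0 ≤ x) → 0 ≤ evenSum xs bb := by
  induction xs with
  | nil => intro bb _; simp [evenSum]
  | cons v rest ih =>
    intro bb h
    have hv : 0 ≤ v := h v (by simp)
    have hr : ∀ x ∈ rest, 0 ≤ x := fun x hx => h x (by simp [hx])
    cases bb with
    | true => have := ih false hr; simp only [evenSum]; omega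
    | false => exact ih true hr

theorem countP_expand (xs : List Int) : ∀ (fid : Int) (isFile : Bool),
    0 ≤ fid → (∀ x ∈ xs, 0 ≤ x) →
    (expand xs fid isFile).countP (· != -1) = (evenSum xs isFile).toNat := by
  induction xs with
  | nil => intro fid isFile _ _; simp [expand, evenSum]
  | cons v rest ih =>
    intro fid isFile hfid h
    have hv : 0 ≤ v := h v (by simp)
    have hr : ∀ x ∈ rest, 0 ≤ x := fun x hx => h x (by simp [hx])
    cases isFile with
    | true =>
      rw [show expand (v :: rest) fid true
            = List.replicate v.toNat fid ++ expand rest (fid + 1) false from by simp [expand]]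
      rw [List.countP_append, List.countP_replicate]
      rw [if_pos (by simp only [bne_iff_ne, ne_eq]; omega)]
      rw [ih (fid + 1) false (by omega) hr]
      have h1 := evenSum_nonneg rest false hr
      rw [show evenSum (v :: rest) true = v + evenSum rest false from rfl]
      omega
    | false =>
      rw [show expand (v :: rest) fid false
            = List.replicate v.toNat (-1) ++ expand rest fid true from by simp [expand]]
      rw [List.countP_append, List.countP_replicate]
      rw [if_neg (by simp)]
      rw [ih fid true hfid hr]
      rw [show evenSum (v :: rest) false = evenSum rest true from rfl]
      omega

theorem foldB (xs : List Int) : ∀ (out t : List Int),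
    (xs.foldl
      (fun (st : List Int × List Int) b =>
        if b = -1 then (st.1 ++ [st.2.getLast?.getD 0], st.2.dropLast)
        else (st.1 ++ [b], st.2))
      (out, t)).1 = out ++ fillF xs t := by
  induction xs with
  | nil => intro out t; simp [fillF]
  | cons x xs ih =>
    intro out t
    by_cases h : x = -1
    · simp only [List.foldl_cons, if_pos h, fillF]
      rw [ih]
      simp [List.append_assoc]
    · simp only [List.foldl_cons, if_neg h, fillF]
      rw [ih]
      simp [List.append_assoc]

theorem alt_eq_spec (d : List Int) (hpre : ∀ x ∈ d, 0 ≤ x) :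
    free_p1_alt d = specMem (expand d 0 true) := by
  have h02 : (decide (PySem.Int.mod 0 2 = 0)) = true := by decide
  have hblocks : buildBlocks d = expand d 0 true := by
    unfold buildBlocks
    rw [buildAux d 0 0 []]
    rw [h02]
    simp
  have hE : fileTotalB d = evenSum d true := by
    unfold fileTotalB
    rw [evenSumAux d 0, h02]
  have hEnn : 0 ≤ evenSum d true := evenSum_nonneg d true hpre
  have hcount : (expand d 0 true).countP (· != -1) = (evenSum d true).toNat :=
    countP_expand d 0 true (by norm_num) hpre
  have hFlen : (expand d 0 true).countP (· != -1) ≤ (expand d 0 true).length :=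
    List.countP_le_length
  simp only [free_p1_alt, hblocks, hE]
  rw [PySem.List.slice_to (expand d 0 true) hEnn]
  rw [PySem.List.slice_from (expand d 0 true) hEnn]
  rw [foldB]
  rw [PySem.List.pyRepeat_singleton, PySem.List.len_eq]
  unfold specMem
  rw [hcount]
  congr 2
  omega

-- ===== VERDICT (by name: the statement is the Claim_ definition above) =====
theorem free_p1_spec : Claim_equal_free_p1 := by
  intro d _ hpre
  unfold Spec_free_p1
  rw [free_p1_eq_loop d hpre, alt_eq_spec d hpre]
  apply loopA_eq_specMem ((expand d 0 true).length) _ 0 _ (by omega) (by omega) (by omega)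
  intro i h
  constructor
  · intro hi
    omega
  · intro hgt
    omega
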